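-- pv_equiv track=rewrite | github.com/rxhxt/ema-analysis | emaAnalysis/momentum_alerts.py | majority_sign
-- ===== SOURCE A (Python) =====
-- def majority_sign(values) -> int:
--     """Return 1 if majority positive, -1 if majority negative, else 0."""
--     s = [1 if v > 0 else (-1 if v < 0 else 0) for v in values]
--     pos, neg = s.count(1), s.count(-1)
--     if pos > neg:
--         return 1
--     if neg > pos:
--         return -1
--     return 0
-- ===== SOURCE B (Python) =====
-- def majority_sign(values) -> int:
--     total = 0
--     for v in values:
--         if v > 0:
--             total += 1
--         elif v < 0:
--             total -= 1
--     if total > 0: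
--         return 1
--     if total < 0:
--         return -1
--     return 0
-- ===== Notes on version B (the rewrite author's own statement) =====
-- stated objective: alternative
-- what changed: Replaces A's intermediate sign list and two .count passes with a single loop accumulating a net total (+1/-1) whose sign is the answer.
import Mathlib
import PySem

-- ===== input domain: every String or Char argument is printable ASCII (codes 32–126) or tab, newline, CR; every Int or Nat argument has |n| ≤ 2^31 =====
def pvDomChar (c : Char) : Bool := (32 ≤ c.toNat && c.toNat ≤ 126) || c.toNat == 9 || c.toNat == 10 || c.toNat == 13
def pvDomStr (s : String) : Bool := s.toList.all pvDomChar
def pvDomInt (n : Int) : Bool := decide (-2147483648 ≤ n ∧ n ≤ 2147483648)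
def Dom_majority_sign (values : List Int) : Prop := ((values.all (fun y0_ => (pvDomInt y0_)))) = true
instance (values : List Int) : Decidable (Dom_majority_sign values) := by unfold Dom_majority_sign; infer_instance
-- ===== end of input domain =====

-- ===== PORT A =====
-- A: build the sign list, count 1s and -1s, compare.
def majority_sign (values : List Int) : Int :=
  let s := values.map (fun v => if v > 0 then (1 : Int) else if v < 0 then -1 else 0)
  let pos := s.count 1
  let neg := s.count (-1)
  if pos > neg then 1
  else if neg > pos then -1
  else 0

-- ===== PORT B =====
-- B: one pass accumulating a net total; return its sign.
def majority_sign_alt (values : List Int) : Int :=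
  let total := values.foldl (fun t v => if v > 0 then t + 1 else if v < 0 then t - 1 else t) (0 : Int)
  if total > 0 then 1
  else if total < 0 then -1
  else 0

-- ===== PRECONDITION & SPEC =====
def Spec_majority_sign (values : List Int) (out : Int) : Prop := out = majority_sign_alt values
instance (values : List Int) (out : Int) : Decidable (Spec_majority_sign values out) := by unfold Spec_majority_sign; infer_instance

-- ===== CLAIM (what is proved, stated in full; the proofs are below) =====
def Claim_equal_majority_sign : Prop := ∀ (values : List Int), Dom_majority_sign values → Spec_majority_sign values (majority_sign values)

-- ===== LEMMAS AND PROOFS =====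

-- ===== VERDICT (by name: the statement is the Claim_ definition above) =====
-- Invariant: the fold's total equals acc + (#positives) - (#negatives).
theorem foldl_total (values : List Int) (acc : Int) :
    values.foldl (fun t v => if v > 0 then t + 1 else if v < 0 then t - 1 else t) acc
      = acc
        + ((values.map (fun v => if v > 0 then (1 : Int) else if v < 0 then -1 else 0)).count 1 : Int)
        - ((values.map (fun v => if v > 0 then (1 : Int) else if v < 0 then -1 else 0)).count (-1) : Int) := by
  induction values generalizing acc with
  | nil => simp
  | cons x xs ih =>
    simp only [List.foldl_cons, List.map_cons, List.count_cons, ih]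
    split_ifs with h1 h2 <;> simp_all <;> omega

theorem majority_sign_spec : Claim_equal_majority_sign := by
  intro values _
  have h := foldl_total values 0
  unfold Spec_majority_sign majority_sign majority_sign_alt
  simp only []
  split_ifs <;> omega
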